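-- pv_equiv track=rewrite | github.com/ghosh-vishnu/project_management | backend/project_management/sprint/ai_services.py | generate_task_description
-- ===== SOURCE A (Python) =====
-- from typing import Dict, List, Optional
--
-- def generate_task_description(title: str, sprint_context: Optional[Dict] = None) -> str:
--     """
--     Generate task description from title using template-based approach
--
--     Args:
--         title: Task title
--         sprint_context: Optional sprint context (name, goals, etc.)
--
--     Returns:
--         Generated task description
--     """
--     if not title:
--         return ""
--
--     # Extract key information from title
--     title_lower = title.lower()
--
--     # Detect task type
--     task_type = "task"
--     if any(word in title_lower for word in ['bug', 'fix', 'error', 'issue']):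
--         task_type = "bug fix"
--     elif any(word in title_lower for word in ['feature', 'add', 'implement', 'create']):
--         task_type = "feature"
--     elif any(word in title_lower for word in ['refactor', 'improve', 'optimize']):
--         task_type = "improvement"
--     elif any(word in title_lower for word in ['test', 'testing']):
--         task_type = "testing"
--     elif any(word in title_lower for word in ['document', 'doc', 'write']):
--         task_type = "documentation"
--
--     # Generate description template
--     description_parts = [
--         f"## {title}",
--         "",
--         f"This {task_type} is part of the sprint work.",
--     ]
--
--     # Add context if available
--     if sprint_context:
--         sprint_name = sprint_context.get('name', '')
--         if sprint_name:
--             description_parts.append(f"\n**Sprint:** {sprint_name}")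
--
--     # Add common sections based on task type
--     if task_type == "bug fix":
--         description_parts.extend([
--             "",
--             "### Steps to Reproduce",
--             "1. ",
--             "",
--             "### Expected Behavior",
--             "",
--             "### Actual Behavior",
--             "",
--         ])
--     elif task_type == "feature":
--         description_parts.extend([
--             "",
--             "### Requirements",
--             "- ",
--             "",
--             "### Acceptance Criteria",
--             "- ",
--         ])
--     elif task_type == "improvement":
--         description_parts.extend([
--             "",
--             "### Current State",
--             "",
--             "### Proposed Changes",
--             "",
--         ])
--
--     description_parts.extend([
--         "",
--         "### Notes",
--         "",
--     ])
--
--     return "\n".join(description_parts)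
-- ===== SOURCE B (Python) =====
-- from typing import Dict, List, Optional
--
-- # keyword -> task type (inverted index over all trigger words)
-- _KEYWORD_TYPE = {
--     'bug': 'bug fix', 'fix': 'bug fix', 'error': 'bug fix', 'issue': 'bug fix',
--     'feature': 'feature', 'add': 'feature', 'implement': 'feature', 'create': 'feature',
--     'refactor': 'improvement', 'improve': 'improvement', 'optimize': 'improvement',
--     'test': 'testing', 'testing': 'testing',
--     'document': 'documentation', 'doc': 'documentation', 'write': 'documentation',
-- }
--
-- _PRIORITY = ['bug fix', 'feature', 'improvement', 'testing', 'documentation']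
--
-- # task type -> pre-joined body of extra sections
-- _SECTIONS = {
--     'bug fix': "\n\n### Steps to Reproduce\n1. \n\n### Expected Behavior\n\n### Actual Behavior\n",
--     'feature': "\n\n### Requirements\n- \n\n### Acceptance Criteria\n- ",
--     'improvement': "\n\n### Current State\n\n### Proposed Changes\n",
-- }
--
--
-- def generate_task_description(title: str, sprint_context: Optional[Dict] = None) -> str:
--     if not title:
--         return ""
--     title_lower = title.lower()
--     # one pass over the inverted index collects every matched type,
--     # then the fixed priority order resolves ties
--     matched = {t for w, t in _KEYWORD_TYPE.items() if w in title_lower}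
--     task_type = next((t for t in _PRIORITY if t in matched), 'task')
--
--     text = f"## {title}\n\nThis {task_type} is part of the sprint work."
--     if sprint_context:
--         sprint_name = sprint_context.get('name', '')
--         if sprint_name:
--             text += f"\n\n**Sprint:** {sprint_name}"
--     text += _SECTIONS.get(task_type, "")
--     text += "\n\n### Notes\n"
--     return text
-- ===== Notes on version B (the rewrite author's own statement) =====
-- stated objective: alternative
-- what changed: Classification now goes through an inverted keyword-to-type index: one comprehension collects the set of ALL matched task types and a fixed priority list resolves which wins, replacing A's staged five-branch if/elif short-circuit scan; assembly drops A's list-of-parts plus newline-join in favour of direct string concatenation of pre-joined section blocks looked up in a dict.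
import Mathlib
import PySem

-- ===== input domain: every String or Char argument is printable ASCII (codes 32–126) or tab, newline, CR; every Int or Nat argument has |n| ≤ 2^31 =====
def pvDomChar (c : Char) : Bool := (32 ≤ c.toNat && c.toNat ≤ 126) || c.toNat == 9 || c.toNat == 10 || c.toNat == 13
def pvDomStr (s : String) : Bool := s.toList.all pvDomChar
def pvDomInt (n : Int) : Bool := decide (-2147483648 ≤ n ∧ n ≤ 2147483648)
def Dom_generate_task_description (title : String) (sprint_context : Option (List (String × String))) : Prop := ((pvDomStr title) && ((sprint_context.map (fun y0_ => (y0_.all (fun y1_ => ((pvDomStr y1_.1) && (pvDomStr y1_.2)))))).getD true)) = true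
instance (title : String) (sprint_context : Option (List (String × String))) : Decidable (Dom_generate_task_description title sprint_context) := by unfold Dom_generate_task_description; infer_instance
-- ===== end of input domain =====

-- B replaces A's staged if/elif classification and list-of-parts/join assembly by an
-- inverted keyword→type index resolved through a priority list, and builds the result
-- by direct string concatenation of pre-joined section blocks (objective: alternative).

-- ===== PORT A =====
def generate_task_description (title : String) (sprint_context : Option (List (String × String))) : String :=
  if title = "" then ""
  else
    let title_lower := PySem.Str.lower title
    let task_type :=
      if ["bug", "fix", "error", "issue"].any (fun w => PySem.Str.isIn w title_lower) then "bug fix"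
      else if ["feature", "add", "implement", "create"].any (fun w => PySem.Str.isIn w title_lower) then "feature"
      else if ["refactor", "improve", "optimize"].any (fun w => PySem.Str.isIn w title_lower) then "improvement"
      else if ["test", "testing"].any (fun w => PySem.Str.isIn w title_lower) then "testing"
      else if ["document", "doc", "write"].any (fun w => PySem.Str.isIn w title_lower) then "documentation"
      else "task"
    let description_parts := ["## " ++ title, "", "This " ++ task_type ++ " is part of the sprint work."]
    -- `if sprint_context:` — truthy iff present and a non-empty dict
    let description_parts :=
      match sprint_context with
      | none => description_parts
      | some d =>
        if d = [] then description_parts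
        else
          let sprint_name := PySem.Dict.getD (PySem.Dict.ofList d) "name" ""
          if sprint_name = "" then description_parts
          else description_parts ++ ["\n**Sprint:** " ++ sprint_name]
    let description_parts :=
      if task_type = "bug fix" then
        description_parts ++ ["", "### Steps to Reproduce", "1. ", "", "### Expected Behavior", "", "### Actual Behavior", ""]
      else if task_type = "feature" then
        description_parts ++ ["", "### Requirements", "- ", "", "### Acceptance Criteria", "- "]
      else if task_type = "improvement" then
        description_parts ++ ["", "### Current State", "", "### Proposed Changes", ""]
      else description_parts
    let description_parts := description_parts ++ ["", "### Notes", ""]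
    PySem.Str.join "\n" description_parts

-- ===== PORT B =====
-- _KEYWORD_TYPE.items() in insertion order (keyword → task type)
def pvKeywordType : List (String × String) :=
  [("bug", "bug fix"), ("fix", "bug fix"), ("error", "bug fix"), ("issue", "bug fix"),
   ("feature", "feature"), ("add", "feature"), ("implement", "feature"), ("create", "feature"),
   ("refactor", "improvement"), ("improve", "improvement"), ("optimize", "improvement"),
   ("test", "testing"), ("testing", "testing"),
   ("document", "documentation"), ("doc", "documentation"), ("write", "documentation")]

def pvPriority : List String :=
  ["bug fix", "feature", "improvement", "testing", "documentation"]

-- _SECTIONS: task type → pre-joined body of extra sections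
def pvSections : PySem.Dict String String :=
  PySem.Dict.ofList
  [("bug fix", "\n\n### Steps to Reproduce\n1. \n\n### Expected Behavior\n\n### Actual Behavior\n"),
   ("feature", "\n\n### Requirements\n- \n\n### Acceptance Criteria\n- "),
   ("improvement", "\n\n### Current State\n\n### Proposed Changes\n")]

-- next((t for t in _PRIORITY if t in matched), 'task')
def pvFirstMatched (matched : PySem.Set String) : List String → String
  | [] => "task"
  | t :: rest => if PySem.Set.contains matched t then t else pvFirstMatched matched rest

def generate_task_description_alt (title : String) (sprint_context : Option (List (String × String))) : String :=
  if title = "" then ""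
  else
    let title_lower := PySem.Str.lower title
    -- {t for w, t in _KEYWORD_TYPE.items() if w in title_lower} (consumed by membership only)
    let matched : PySem.Set String :=
      PySem.Set.ofList ((pvKeywordType.filter (fun p => PySem.Str.isIn p.1 title_lower)).map (·.2))
    let task_type := pvFirstMatched matched pvPriority
    let text := "## " ++ title ++ "\n\nThis " ++ task_type ++ " is part of the sprint work."
    let text :=
      match sprint_context with
      | none => text
      | some d =>
        if d = [] then text
        else
          let sprint_name := PySem.Dict.getD (PySem.Dict.ofList d) "name" ""
          if sprint_name = "" then text
          else text ++ "\n\n**Sprint:** " ++ sprint_name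
    let text := text ++ PySem.Dict.getD pvSections task_type ""
    text ++ "\n\n### Notes\n"

-- ===== PRECONDITION & SPEC =====
def Spec_generate_task_description (title : String) (sprint_context : Option (List (String × String))) (out : String) : Prop := out = generate_task_description_alt title sprint_context
instance (title : String) (sprint_context : Option (List (String × String))) (out : String) : Decidable (Spec_generate_task_description title sprint_context out) := by unfold Spec_generate_task_description; infer_instance

-- ===== CLAIM (what is proved, stated in full; the proofs are below) =====
def Claim_equal_generate_task_description : Prop := ∀ (title : String) (sprint_context : Option (List (String × String))), Dom_generate_task_description title sprint_context → Spec_generate_task_description title sprint_context (generate_task_description title sprint_context)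

-- ===== LEMMAS AND PROOFS =====

-- B's matched set for a given lowered title
def pvMatched (tl : String) : PySem.Set String :=
  PySem.Set.ofList ((pvKeywordType.filter (fun p => PySem.Str.isIn p.1 tl)).map (·.2))

theorem cont_bug (tl : String) :
    PySem.Set.contains (pvMatched tl) "bug fix" =
      (["bug", "fix", "error", "issue"].any (fun w => PySem.Str.isIn w tl)) := by
  rw [Bool.eq_iff_iff]
  simp [pvMatched, pvKeywordType, PySem.Set.mem_ofList, List.mem_filter]
  

theorem cont_feat (tl : String) :
    PySem.Set.contains (pvMatched tl) "feature" =
      (["feature", "add", "implement", "create"].any (fun w => PySem.Str.isIn w tl)) := by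
  rw [Bool.eq_iff_iff]
  simp [pvMatched, pvKeywordType, PySem.Set.mem_ofList, List.mem_filter]
  

theorem cont_impr (tl : String) :
    PySem.Set.contains (pvMatched tl) "improvement" =
      (["refactor", "improve", "optimize"].any (fun w => PySem.Str.isIn w tl)) := by
  rw [Bool.eq_iff_iff]
  simp [pvMatched, pvKeywordType, PySem.Set.mem_ofList, List.mem_filter]
  

theorem cont_test (tl : String) :
    PySem.Set.contains (pvMatched tl) "testing" =
      (["test", "testing"].any (fun w => PySem.Str.isIn w tl)) := by
  rw [Bool.eq_iff_iff]
  simp [pvMatched, pvKeywordType, PySem.Set.mem_ofList, List.mem_filter]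
  

theorem cont_doc (tl : String) :
    PySem.Set.contains (pvMatched tl) "documentation" =
      (["document", "doc", "write"].any (fun w => PySem.Str.isIn w tl)) := by
  rw [Bool.eq_iff_iff]
  simp [pvMatched, pvKeywordType, PySem.Set.mem_ofList, List.mem_filter]
  

-- A's if/elif chain computes B's priority scan over the matched set
theorem pick_eq (tl : String) :
    (if ["bug", "fix", "error", "issue"].any (fun w => PySem.Str.isIn w tl) then "bug fix"
     else if ["feature", "add", "implement", "create"].any (fun w => PySem.Str.isIn w tl) then "feature"
     else if ["refactor", "improve", "optimize"].any (fun w => PySem.Str.isIn w tl) then "improvement"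
     else if ["test", "testing"].any (fun w => PySem.Str.isIn w tl) then "testing"
     else if ["document", "doc", "write"].any (fun w => PySem.Str.isIn w tl) then "documentation"
     else "task") = pvFirstMatched (pvMatched tl) pvPriority := by
  simp only [pvFirstMatched, pvPriority, cont_bug, cont_feat, cont_impr, cont_test, cont_doc]

theorem pick_mem (tl : String) :
    pvFirstMatched (pvMatched tl) pvPriority = "bug fix" ∨
    pvFirstMatched (pvMatched tl) pvPriority = "feature" ∨
    pvFirstMatched (pvMatched tl) pvPriority = "improvement" ∨
    pvFirstMatched (pvMatched tl) pvPriority = "testing" ∨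
    pvFirstMatched (pvMatched tl) pvPriority = "documentation" ∨
    pvFirstMatched (pvMatched tl) pvPriority = "task" := by
  simp only [pvFirstMatched, pvPriority]
  split_ifs <;> simp

theorem sec_bug : PySem.Dict.getD pvSections "bug fix" "" =
    "\n\n### Steps to Reproduce\n1. \n\n### Expected Behavior\n\n### Actual Behavior\n" := by decide
theorem sec_feat : PySem.Dict.getD pvSections "feature" "" =
    "\n\n### Requirements\n- \n\n### Acceptance Criteria\n- " := by decide
theorem sec_impr : PySem.Dict.getD pvSections "improvement" "" =
    "\n\n### Current State\n\n### Proposed Changes\n" := by decide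
theorem sec_test : PySem.Dict.getD pvSections "testing" "" = "" := by decide
theorem sec_doc : PySem.Dict.getD pvSections "documentation" "" = "" := by decide
theorem sec_task : PySem.Dict.getD pvSections "task" "" = "" := by decide

-- ===== VERDICT (by name: the statement is the Claim_ definition above) =====
set_option maxHeartbeats 2000000 in
theorem generate_task_description_spec : Claim_equal_generate_task_description := by
  intro title sc _
  unfold Spec_generate_task_description
  simp only [generate_task_description, generate_task_description_alt]
  by_cases h0 : title = ""
  · simp [h0]
  · simp only [h0, if_false]
    rw [pick_eq (PySem.Str.lower title), ← pvMatched]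
    rcases pick_mem (PySem.Str.lower title) with h | h | h | h | h | h <;>
      rw [h] <;>
      (first | rw [sec_bug] | rw [sec_feat] | rw [sec_impr]
             | rw [sec_test] | rw [sec_doc] | rw [sec_task]) <;>
      rcases sc with _ | d <;>
      dsimp only <;>
      (try simp only [String.reduceEq, reduceIte]) <;>
      (try split_ifs with hd hn) <;>
      (apply String.toList_injective
       simp [PySem.Str.join, PySem.Chars.join, List.intercalate, List.intersperse])
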